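-- pv_equiv track=rewrite | github.com/jonreymond/query-scheduler-decision-tree | src/main/python/.ipynb_checkpoints/utils-checkpoint.py | get_path_sets
-- ===== SOURCE A (Python) =====
-- import math
--
-- def get_path_sets(q_list):
--     results = [set([q_list[0]])]
--     height = int(math.log2(len(q_list)))
--
--     for i in range(height):
--         for j in range(2**i):
--             idx_parent = int(j + 2**i - 1)
--             parent_set = results[idx_parent]
--
--             idx_left = 2**(i + 1) + j*2 - 1
--             left_set = parent_set.copy()
--             left_set.add(q_list[idx_left])
--             results.append(left_set)
--
--             right_set = parent_set.copy()
--             right_set.add(q_list[idx_left + 1])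
--             results.append(right_set)
--
--     return results[2**height - 1:]
-- ===== SOURCE B (Python) =====
-- def get_path_sets(q_list):
--     root = q_list[0]
--     import math
--     height = int(math.log2(len(q_list)))
--     out = []
--     for leaf in range(2 ** height - 1, 2 ** (height + 1) - 1):
--         path = []
--         idx = leaf
--         while idx > 0:
--             path.append(q_list[idx])
--             idx = (idx - 1) // 2
--         s = {root}
--         for v in reversed(path):
--             s.add(v)
--         out.append(s)
--     return out
-- ===== Notes on version B (the rewrite author's own statement) =====
-- stated objective: alternative
-- what changed: Instead of building a set for every internal heap node level by level and slicing off the leaves, B iterates directly over the leaf index range and builds each leaf's set by walking up to the root via parent indices (idx-1)//2, never materialising internal-node sets.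
import Mathlib
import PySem

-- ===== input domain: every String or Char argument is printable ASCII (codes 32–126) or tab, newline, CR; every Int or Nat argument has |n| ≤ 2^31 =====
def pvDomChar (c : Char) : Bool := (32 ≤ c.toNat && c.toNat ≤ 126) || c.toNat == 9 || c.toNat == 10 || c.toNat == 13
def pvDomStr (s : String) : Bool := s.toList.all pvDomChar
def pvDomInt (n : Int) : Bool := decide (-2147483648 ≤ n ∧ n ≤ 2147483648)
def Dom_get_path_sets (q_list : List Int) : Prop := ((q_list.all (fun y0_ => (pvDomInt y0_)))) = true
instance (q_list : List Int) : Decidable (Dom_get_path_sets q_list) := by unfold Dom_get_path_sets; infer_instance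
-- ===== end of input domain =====

-- B builds each leaf's path set by walking up the heap from the leaf; A builds every node's set level by level.

-- ===== PORT A =====
-- A-side helpers: the two nested loop bodies of A, named for reuse in the proofs
def pvStepA (q_list : List Int) (i : Nat) (results : List (PySem.Set Int)) (j : Nat) : List (PySem.Set Int) :=
  let idx_parent : Nat := j + 2 ^ i - 1
  let parent_set := results.getD idx_parent []
  let idx_left : Nat := 2 ^ (i + 1) + j * 2 - 1
  let left_set := PySem.Set.add parent_set ((PySem.List.pyGet? q_list (idx_left : Int)).getD 0)
  let right_set := PySem.Set.add parent_set ((PySem.List.pyGet? q_list ((idx_left : Int) + 1)).getD 0)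
  results ++ [left_set, right_set]

def pvLevelA (q_list : List Int) (results : List (PySem.Set Int)) (i : Nat) : List (PySem.Set Int) :=
  (List.range (2 ^ i)).foldl (pvStepA q_list i) results

-- level-by-level construction: results grows as a heap array of sets, leaves are sliced off at the end
def get_path_sets (q_list : List Int) : List (List Int) :=
  let results : List (PySem.Set Int) := [PySem.Set.ofList [(PySem.List.pyGet? q_list 0).getD 0]]
  let height : Nat := Nat.log2 q_list.length
  let results := (List.range height).foldl (pvLevelA q_list) results
  PySem.List.slice results (some ((2 ^ height - 1 : Nat) : Int)) none

-- ===== PORT B =====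
-- while idx > 0: path.append(q_list[idx]); idx = (idx-1)//2
def pvPathUp (q_list : List Int) (idx : Nat) : List Int :=
  if _h : idx = 0 then []
  else ((PySem.List.pyGet? q_list (idx : Int)).getD 0) :: pvPathUp q_list ((idx - 1) / 2)
decreasing_by exact Nat.div_lt_of_lt_mul (by omega)

def get_path_sets_alt (q_list : List Int) : List (List Int) :=
  let root : Int := (PySem.List.pyGet? q_list 0).getD 0
  let height : Nat := Nat.log2 q_list.length
  (List.range' (2 ^ height - 1) (2 ^ height)).map (fun leaf =>
    let path := pvPathUp q_list leaf
    path.reverse.foldl PySem.Set.add (PySem.Set.ofList [root]))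

-- ===== PRECONDITION & SPEC =====
-- Pre_ excludes exactly the inputs where Python A raises IndexError: lengths that are not 2^(h+1)-1
def Pre_get_path_sets (q_list : List Int) : Prop := ∃ h < q_list.length, q_list.length + 1 = 2 ^ (h + 1)
instance (q_list : List Int) : Decidable (Pre_get_path_sets q_list) := by unfold Pre_get_path_sets; infer_instance
def pvWitness_get_path_sets : List Int := [5, 2, 9]

def Spec_get_path_sets (q_list : List Int) (out : List (List Int)) : Prop := out = get_path_sets_alt q_list
instance (q_list : List Int) (out : List (List Int)) : Decidable (Spec_get_path_sets q_list out) := by unfold Spec_get_path_sets; infer_instance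

-- ===== CLAIM (what is proved, stated in full; the proofs are below) =====
def Claim_equal_get_path_sets : Prop := ∀ (q_list : List Int), Dom_get_path_sets q_list → Pre_get_path_sets q_list → Spec_get_path_sets q_list (get_path_sets q_list)

-- ===== LEMMAS AND PROOFS =====

-- the path set of heap node k, built top-down (root value first)
def pvPathSet (q_list : List Int) (k : Nat) : PySem.Set Int :=
  if _h : k = 0 then PySem.Set.ofList [(PySem.List.pyGet? q_list 0).getD 0]
  else PySem.Set.add (pvPathSet q_list ((k - 1) / 2)) ((PySem.List.pyGet? q_list (k : Int)).getD 0)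
decreasing_by exact Nat.div_lt_of_lt_mul (by omega)

lemma pvAltLeaf (q : List Int) (k : Nat) :
    (pvPathUp q k).reverse.foldl PySem.Set.add
      (PySem.Set.ofList [(PySem.List.pyGet? q 0).getD 0]) = pvPathSet q k := by
  induction k using Nat.strong_induction_on with
  | _ k ih =>
    by_cases h : k = 0
    · subst h; simp [pvPathUp, pvPathSet]
    · rw [pvPathUp, pvPathSet]
      simp only [h, dite_false, List.reverse_cons, List.foldl_append, List.foldl_cons, List.foldl_nil]
      rw [ih _ (Nat.div_lt_of_lt_mul (by omega))]

lemma pvInner (q : List Int) (i : Nat) :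
    ∀ j ≤ 2 ^ i,
    (List.range j).foldl (pvStepA q i) ((List.range (2 ^ (i + 1) - 1)).map (pvPathSet q))
    = (List.range (2 ^ (i + 1) - 1 + 2 * j)).map (pvPathSet q) := by
  intro j hj
  induction j with
  | zero => simp
  | succ j ih =>
    rw [List.range_succ, List.foldl_append, ih (by omega), List.foldl_cons, List.foldl_nil]
    have h2i : 1 ≤ 2 ^ i := Nat.one_le_two_pow
    have hm : 2 ^ (i + 1) = 2 * 2 ^ i := by ring
    unfold pvStepA
    have hpar : j + 2 ^ i - 1 < 2 ^ (i + 1) - 1 + 2 * j := by omega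
    have hget : ((List.range (2 ^ (i + 1) - 1 + 2 * j)).map (pvPathSet q)).getD (j + 2 ^ i - 1) []
        = pvPathSet q (j + 2 ^ i - 1) := by
      rw [List.getD_eq_getElem?_getD, List.getElem?_map, List.getElem?_range hpar]
      rfl
    simp only [hget]
    have hL : 2 ^ (i + 1) + j * 2 - 1 = 2 ^ (i + 1) - 1 + 2 * j := by omega
    rw [hL]
    have hcast : ((2 ^ (i + 1) - 1 + 2 * j : Nat) : Int) + 1 = ((2 ^ (i + 1) - 1 + 2 * j + 1 : Nat) : Int) := by
      push_cast; ring
    rw [hcast]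
    have hLset : pvPathSet q (2 ^ (i + 1) - 1 + 2 * j)
        = PySem.Set.add (pvPathSet q (j + 2 ^ i - 1))
            ((PySem.List.pyGet? q ((2 ^ (i + 1) - 1 + 2 * j : Nat) : Int)).getD 0) := by
      rw [pvPathSet]
      have hne : ¬ (2 ^ (i + 1) - 1 + 2 * j = 0) := by omega
      have hp : ((2 ^ (i + 1) - 1 + 2 * j) - 1) / 2 = j + 2 ^ i - 1 := by omega
      simp only [hne, dite_false, hp]
    have hRset : pvPathSet q (2 ^ (i + 1) - 1 + 2 * j + 1)
        = PySem.Set.add (pvPathSet q (j + 2 ^ i - 1))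
            ((PySem.List.pyGet? q ((2 ^ (i + 1) - 1 + 2 * j + 1 : Nat) : Int)).getD 0) := by
      rw [pvPathSet]
      have hne : ¬ (2 ^ (i + 1) - 1 + 2 * j + 1 = 0) := by omega
      have hp : ((2 ^ (i + 1) - 1 + 2 * j + 1) - 1) / 2 = j + 2 ^ i - 1 := by omega
      simp only [hne, dite_false, hp]
    rw [← hLset, ← hRset]
    have hstep : 2 ^ (i + 1) - 1 + 2 * (j + 1) = (2 ^ (i + 1) - 1 + 2 * j + 1) + 1 := by omega
    rw [hstep, List.range_succ, List.range_succ, List.map_append, List.map_append]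
    simp

lemma pvLevels (q : List Int) (h : Nat) :
    (List.range h).foldl (pvLevelA q) [PySem.Set.ofList [(PySem.List.pyGet? q 0).getD 0]]
    = (List.range (2 ^ (h + 1) - 1)).map (pvPathSet q) := by
  induction h with
  | zero => simp [pvPathSet]
  | succ h ih =>
    rw [List.range_succ, List.foldl_append, ih, List.foldl_cons, List.foldl_nil]
    unfold pvLevelA
    rw [pvInner q h (2 ^ h) (le_refl _)]
    have h1 : (2:Nat) ^ (h + 1 + 1) = 2 * 2 ^ (h + 1) := by ring
    have h2 : (2:Nat) ^ (h + 1) = 2 * 2 ^ h := by ring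
    have h3 : 1 ≤ (2:Nat) ^ h := Nat.one_le_two_pow
    have harg : 2 ^ (h + 1) - 1 + 2 * 2 ^ h = 2 ^ (h + 1 + 1) - 1 := by omega
    rw [harg]

-- ===== VERDICT (by name: the statement is the Claim_ definition above) =====
theorem get_path_sets_spec : Claim_equal_get_path_sets := by
  intro q _dom hpre
  obtain ⟨h, hlt, hlen⟩ := hpre
  unfold Spec_get_path_sets get_path_sets get_path_sets_alt
  have hlog : Nat.log2 q.length = h := by
    have h1 : 2 ^ h ≤ q.length := by
      have : (2:Nat) ^ (h+1) = 2 * 2 ^ h := by ring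
      omega
    have h2 : q.length < 2 ^ (h + 1) := by omega
    have := Nat.log2_eq_log_two (n := q.length)
    rw [this]
    exact Nat.log_eq_of_pow_le_of_lt_pow h1 h2
  simp only [hlog]
  rw [pvLevels q h]
  rw [PySem.List.slice_from_natCast]
  have h2 : (2:Nat) ^ (h + 1) = 2 * 2 ^ h := by ring
  have h3 : 1 ≤ (2:Nat) ^ h := Nat.one_le_two_pow
  have hsplit : List.range (2 ^ (h + 1) - 1) = List.range' 0 (2 ^ h - 1) ++ List.range' (2 ^ h - 1) (2 ^ h) := by
    rw [List.range_eq_range']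
    have hsz : 2 ^ (h + 1) - 1 = (2 ^ h - 1) + 2 ^ h := by omega
    rw [hsz]
    have happ := List.range'_append (s:=0) (m:=2 ^ h - 1) (n:=2 ^ h) (step:=1)
    simpa using happ.symm
  rw [hsplit, List.map_append,
    List.drop_left' (by simp : (List.map (pvPathSet q) (List.range' 0 (2 ^ h - 1))).length = 2 ^ h - 1)]
  apply List.map_congr_left
  intro leaf _
  exact (pvAltLeaf q leaf).symm
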